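-- pv_equiv track=rewrite | github.com/S0juboy/Go_set2-ITMGT45 | set2.py | shift_by_letter
-- ===== SOURCE A (Python) =====
-- def shift_letter(letter, shift):
--     '''Shift Letter.'''
--     alphabet = "ABCDEFGHIJKLMNOPQRSTUVWXYZ"
--
--     if letter == " ":
--         return " "
--
--     index = 0
--     while index < 26:
--         if alphabet[index] == letter:
--             return alphabet[(index + shift) % 26]
--         index += 1
--
-- def shift_by_letter(letter, letter_shift):
--     '''Shift By Letter.'''
--     alphabet = "ABCDEFGHIJKLMNOPQRSTUVWXYZ"
--
--     if letter == " ":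
--         return " "
--
--     shift = 0
--     while shift < 26:
--         if alphabet[shift] == letter_shift:
--             return shift_letter(letter, shift)
--         shift += 1
-- ===== SOURCE B (Python) =====
-- def shift_by_letter(letter, letter_shift):
--     '''Shift By Letter: chr/ord arithmetic instead of scanning the alphabet.'''
--     if letter == " ":
--         return " "
--     if len(letter) == 1 and len(letter_shift) == 1 and "A" <= letter <= "Z" and "A" <= letter_shift <= "Z":
--         return chr((ord(letter) + ord(letter_shift) - 2 * ord("A")) % 26 + ord("A"))
--     return None
-- ===== Notes on version B (the rewrite author's own statement) =====
-- stated objective: idiomatic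
-- what changed: Replaced the two 26-iteration alphabet-scan while-loops (and the shift_letter helper) with a single length/range check plus ord/chr modular arithmetic.
import Mathlib
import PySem

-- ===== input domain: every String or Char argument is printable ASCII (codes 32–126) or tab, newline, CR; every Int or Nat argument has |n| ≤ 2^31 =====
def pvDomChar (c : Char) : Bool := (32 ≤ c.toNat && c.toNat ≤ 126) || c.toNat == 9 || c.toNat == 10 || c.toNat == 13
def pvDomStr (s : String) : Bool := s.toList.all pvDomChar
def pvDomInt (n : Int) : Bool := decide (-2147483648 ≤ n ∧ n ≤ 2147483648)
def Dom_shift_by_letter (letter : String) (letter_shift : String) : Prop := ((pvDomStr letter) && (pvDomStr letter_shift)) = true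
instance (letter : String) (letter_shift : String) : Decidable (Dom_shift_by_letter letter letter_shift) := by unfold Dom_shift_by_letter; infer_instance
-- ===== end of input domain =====

-- B inlines A's helper and both 26-step alphabet scans into one ord/chr modular-arithmetic formula (idiomatic rewrite).

-- ===== PORT A =====
-- the module constant `alphabet`, as its character list (Python indexing yields the 1-char string)
def pvAlpha : List Char := "ABCDEFGHIJKLMNOPQRSTUVWXYZ".toList

-- `while index < 26` loop of shift_letter; `getD` default is never used since pvAlpha has length 26
def pvShiftLetterLoop (letter : String) (shift : Nat) (index : Nat) : Option String :=
  if index < 26 then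
    if String.ofList [pvAlpha.getD index 'A'] == letter then
      some (String.ofList [pvAlpha.getD ((index + shift) % 26) 'A'])
    else pvShiftLetterLoop letter shift (index + 1)
  else none
termination_by 26 - index

-- helper shift_letter (the `shift` it receives is the outer loop counter, hence a Nat)
def pvShiftLetter (letter : String) (shift : Nat) : Option String :=
  if letter == " " then some " "
  else pvShiftLetterLoop letter shift 0

-- `while shift < 26` loop of shift_by_letter
def pvShiftByLoop (letter : String) (letter_shift : String) (shift : Nat) : Option String :=
  if shift < 26 then
    if String.ofList [pvAlpha.getD shift 'A'] == letter_shift then pvShiftLetter letter shift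
    else pvShiftByLoop letter letter_shift (shift + 1)
  else none
termination_by 26 - shift

def shift_by_letter (letter : String) (letter_shift : String) : Option String :=
  if letter == " " then some " "
  else pvShiftByLoop letter letter_shift 0

-- ===== PORT B =====
def shift_by_letter_alt (letter : String) (letter_shift : String) : Option String :=
  if letter == " " then some " "
  else
    match letter.toList, letter_shift.toList with
    | [c], [s] =>
        if 'A' ≤ c ∧ c ≤ 'Z' ∧ 'A' ≤ s ∧ s ≤ 'Z' then
          some (String.ofList [Char.ofNat ((c.toNat + s.toNat - 130) % 26 + 65)])
        else none
    | _, _ => none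

-- ===== PRECONDITION & SPEC =====
def Spec_shift_by_letter (letter : String) (letter_shift : String) (out : Option String) : Prop := out = shift_by_letter_alt letter letter_shift
instance (letter : String) (letter_shift : String) (out : Option String) : Decidable (Spec_shift_by_letter letter letter_shift out) := by unfold Spec_shift_by_letter; infer_instance

-- ===== CLAIM (what is proved, stated in full; the proofs are below) =====
def Claim_equal_shift_by_letter : Prop := ∀ (letter : String) (letter_shift : String), Dom_shift_by_letter letter letter_shift → Spec_shift_by_letter letter letter_shift (shift_by_letter letter letter_shift)

-- ===== LEMMAS AND PROOFS =====

-- index of a single uppercase letter in the alphabet, none otherwise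
def pvIdx? (s : String) : Option Nat :=
  match s.toList with
  | [c] => if 'A' ≤ c ∧ c ≤ 'Z' then some (c.toNat - 65) else none
  | _ => none

lemma pvAlpha_getD (i : Nat) (h : i < 26) : pvAlpha.getD i 'A' = Char.ofNat (65 + i) := by
  interval_cases i <;> decide

lemma pvIdx?_lt {s : String} {i : Nat} (h : pvIdx? s = some i) : i < 26 := by
  unfold pvIdx? at h
  rcases hs : s.toList with _ | ⟨c, _ | _⟩ <;> simp [hs] at h
  rcases h with ⟨⟨_, h2⟩, h3⟩
  have : c.toNat ≤ 90 := h2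
  omega

lemma pvMatch_iff (i : Nat) (h : i < 26) (s : String) :
    ((String.ofList [pvAlpha.getD i 'A'] == s) = true) ↔ pvIdx? s = some i := by
  rw [pvAlpha_getD i h]
  constructor
  · intro he
    have hs : s = String.ofList [Char.ofNat (65 + i)] := (beq_iff_eq.mp he).symm
    subst hs
    unfold pvIdx?
    simp only [String.toList_ofList]
    have hA : 'A' ≤ Char.ofNat (65 + i) ∧ Char.ofNat (65 + i) ≤ 'Z' ∧ (Char.ofNat (65 + i)).toNat = 65 + i := by
      interval_cases i <;> exact ⟨by decide, by decide, by decide⟩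
    simp [hA.1, hA.2.1, hA.2.2]
  · intro hi
    unfold pvIdx? at hi
    rcases hs : s.toList with _ | ⟨c, _ | _⟩ <;> rw [hs] at hi <;> simp at hi
    rcases hi with ⟨⟨h1, h2⟩, h3⟩
    have hc : c.toNat = 65 + i := by
      have : 65 ≤ c.toNat := h1
      omega
    have hco : c = Char.ofNat (65 + i) := by
      apply Char.ext; apply UInt32.toNat_inj.mp
      have hv : (Char.ofNat (65 + i)).toNat = 65 + i := by interval_cases i <;> decide
      show c.toNat = (Char.ofNat (65 + i)).toNat
      rw [hv, hc]
    have hss : String.ofList [c] = s := by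
      have h := congrArg String.ofList hs
      simpa using h.symm
    rw [beq_iff_eq, ← hss, hco]

lemma pvInnerLoop (letter : String) (shift : Nat) :
    ∀ n k, 26 - k ≤ n →
      pvShiftLetterLoop letter shift k =
        match pvIdx? letter with
        | some i => if k ≤ i then some (String.ofList [pvAlpha.getD ((i + shift) % 26) 'A']) else none
        | none => none := by
  intro n
  induction n with
  | zero =>
    intro k hk
    rw [pvShiftLetterLoop]
    have h26 : ¬ k < 26 := by omega
    simp only [h26, if_false]
    rcases hi : pvIdx? letter with _ | i
    · rfl
    · have := pvIdx?_lt hi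
      have : ¬ k ≤ i := by omega
      simp [this]
  | succ n ih =>
    intro k hk
    rw [pvShiftLetterLoop]
    by_cases h26 : k < 26
    · simp only [h26, if_true]
      by_cases hm : (String.ofList [pvAlpha.getD k 'A'] == letter) = true
      · have hi := (pvMatch_iff k h26 letter).mp hm
        rw [if_pos hm, hi]
        simp
      · rw [if_neg hm, ih (k + 1) (by omega)]
        rcases hi : pvIdx? letter with _ | i
        · rfl
        · have hne : i ≠ k := by
            intro he; exact hm ((pvMatch_iff k h26 letter).mpr (he ▸ hi))
          by_cases hle : k ≤ i
          · have : k + 1 ≤ i := by omega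
            simp [hle, this]
          · have : ¬ k + 1 ≤ i := by omega
            simp [hle, this]
    · simp only [h26, if_false]
      rcases hi : pvIdx? letter with _ | i
      · rfl
      · have := pvIdx?_lt hi
        have : ¬ k ≤ i := by omega
        simp [this]

lemma pvOuterLoop (letter letter_shift : String) :
    ∀ n k, 26 - k ≤ n →
      pvShiftByLoop letter letter_shift k =
        match pvIdx? letter_shift with
        | some j => if k ≤ j then pvShiftLetter letter j else none
        | none => none := by
  intro n
  induction n with
  | zero =>
    intro k hk
    rw [pvShiftByLoop]
    have h26 : ¬ k < 26 := by omega
    simp only [h26, if_false]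
    rcases hj : pvIdx? letter_shift with _ | j
    · rfl
    · have := pvIdx?_lt hj
      have : ¬ k ≤ j := by omega
      simp [this]
  | succ n ih =>
    intro k hk
    rw [pvShiftByLoop]
    by_cases h26 : k < 26
    · simp only [h26, if_true]
      by_cases hm : (String.ofList [pvAlpha.getD k 'A'] == letter_shift) = true
      · have hj := (pvMatch_iff k h26 letter_shift).mp hm
        rw [if_pos hm, hj]
        simp
      · rw [if_neg hm, ih (k + 1) (by omega)]
        rcases hj : pvIdx? letter_shift with _ | j
        · rfl
        · have hne : j ≠ k := by
            intro he; exact hm ((pvMatch_iff k h26 letter_shift).mpr (he ▸ hj))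
          by_cases hle : k ≤ j
          · have : k + 1 ≤ j := by omega
            simp [hle, this]
          · have : ¬ k + 1 ≤ j := by omega
            simp [hle, this]
    · simp only [h26, if_false]
      rcases hj : pvIdx? letter_shift with _ | j
      · rfl
      · have := pvIdx?_lt hj
        have : ¬ k ≤ j := by omega
        simp [this]

lemma pvAlt_eq (letter letter_shift : String) :
    shift_by_letter_alt letter letter_shift =
      if letter == " " then some " "
      else
        match pvIdx? letter, pvIdx? letter_shift with
        | some i, some j => some (String.ofList [Char.ofNat ((i + j) % 26 + 65)])
        | _, _ => none := by
  unfold shift_by_letter_alt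
  by_cases hsp : (letter == " ") = true
  · simp [hsp]
  · rw [if_neg hsp, if_neg hsp]
    unfold pvIdx?
    rcases hl : letter.toList with _ | ⟨c, _ | _⟩ <;>
      rcases hr : letter_shift.toList with _ | ⟨s, _ | _⟩ <;> simp
    by_cases hc : 'A' ≤ c ∧ c ≤ 'Z'
    · by_cases hs : 'A' ≤ s ∧ s ≤ 'Z'
      · have h1 : 65 ≤ c.toNat := hc.1
        have h2 : 65 ≤ s.toNat := hs.1
        have harith : c.toNat + s.toNat - 130 = (c.toNat - 65) + (s.toNat - 65) := by omega
        rw [harith]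
        simp [hc.1, hc.2, hs.1, hs.2]
      · rcases not_and_or.mp hs with h | h <;> simp [h, hc.1, hc.2]
    · rcases not_and_or.mp hc with h | h <;> simp [h]

-- ===== VERDICT (by name: the statement is the Claim_ definition above) =====
theorem shift_by_letter_spec : Claim_equal_shift_by_letter := by
  intro letter letter_shift _
  show shift_by_letter letter letter_shift = shift_by_letter_alt letter letter_shift
  rw [pvAlt_eq]
  unfold shift_by_letter
  by_cases hsp : (letter == " ") = true
  · simp [hsp]
  · rw [if_neg hsp, if_neg hsp]
    rw [pvOuterLoop letter letter_shift 26 0 (by omega)]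
    rcases hj : pvIdx? letter_shift with _ | j
    · rcases hi : pvIdx? letter with _ | i <;> rfl
    · simp only [Nat.zero_le, if_true]
      unfold pvShiftLetter
      rw [if_neg hsp]
      rw [pvInnerLoop letter j 26 0 (by omega)]
      rcases hi : pvIdx? letter with _ | i
      · rfl
      · simp only [Nat.zero_le, if_true]
        have hlt : (i + j) % 26 < 26 := Nat.mod_lt _ (by omega)
        rw [pvAlpha_getD _ hlt, Nat.add_comm 65 _]
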